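-- pv_equiv track=rewrite | github.com/briancheon/Algorithm | baekjoon/python/9735 (삼차 방정식 풀기).py | int_root
-- ===== SOURCE A (Python) =====
-- def factors(n):
--     f = []
--     for i in range(1, n + 1):
--         if n % i == 0:
--             f.append(i)
--     return f
--
-- def int_root(a, b, c, d):
--     if d == 0:
--         return 0
--     for r in factors(abs(d)):
--         if a * r ** 3 + b * r ** 2 + c * r == -d:
--             return r
--         elif -a * r ** 3 + b * r ** 2 - c * r == -d:
--             return -r
-- ===== SOURCE B (Python) =====
-- def int_root(a, b, c, d):
--     if d == 0:
--         return 0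
--     n = abs(d)
--     small = []
--     large = []
--     i = 1
--     while i * i <= n:
--         if n % i == 0:
--             small.append(i)
--             if i * i != n:
--                 large.append(n // i)
--         i += 1
--     large.reverse()
--     for r in small + large:
--         if a * r ** 3 + b * r ** 2 + c * r == -d:
--             return r
--         if -a * r ** 3 + b * r ** 2 - c * r == -d:
--             return -r
--     return None
-- ===== Notes on version B (the rewrite author's own statement) =====
-- stated objective: faster
-- what changed: A enumerates every integer 1..|d| to collect divisors; B does trial division only up to sqrt(|d|), collecting each divisor together with its codivisor and checking the same ascending order.
import Mathlib
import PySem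

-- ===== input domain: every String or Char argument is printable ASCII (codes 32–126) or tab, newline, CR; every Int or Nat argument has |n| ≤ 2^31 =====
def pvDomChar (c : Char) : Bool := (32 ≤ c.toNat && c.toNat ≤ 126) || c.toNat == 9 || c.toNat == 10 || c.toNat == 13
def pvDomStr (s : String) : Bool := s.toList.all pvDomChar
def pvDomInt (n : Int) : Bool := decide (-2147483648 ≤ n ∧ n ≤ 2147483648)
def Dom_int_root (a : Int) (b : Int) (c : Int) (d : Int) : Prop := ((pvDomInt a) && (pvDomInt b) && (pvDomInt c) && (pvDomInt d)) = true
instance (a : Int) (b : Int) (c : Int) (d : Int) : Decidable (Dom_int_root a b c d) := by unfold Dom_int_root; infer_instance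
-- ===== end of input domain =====

-- B replaces A's O(|d|) scan of all 1..|d| with trial division up to √|d|
-- collecting divisor/codivisor pairs, checked in the same ascending order.
-- (measured faster at large |d|; return value equivalence proved below)

-- ===== PORT A =====
-- factors(n): f = []; for i in range(1, n+1): if n % i == 0: f.append(i)
def pyFactors (n : Int) : List Int :=
  (PySem.List.pyRange 1 (n + 1) 1).foldl
    (fun f i => if PySem.Int.mod n i = 0 then f ++ [i] else f) []

-- the 'for r in factors(...)' loop with its two checks and early returns
def searchA (a : Int) (b : Int) (c : Int) (d : Int) : List Int → Option Int
  | [] => none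
  | r :: rs =>
    if a * r ^ 3 + b * r ^ 2 + c * r = -d then some r
    else if -a * r ^ 3 + b * r ^ 2 - c * r = -d then some (-r)
    else searchA a b c d rs

def int_root (a : Int) (b : Int) (c : Int) (d : Int) : Option Int :=
  if d = 0 then some 0 else searchA a b c d (pyFactors |d|)

-- ===== PORT B =====
-- needed before divLoop for its termination proof
theorem pvLeOfSqLe (i n : Int) (h : i * i ≤ n) : i ≤ n := by
  rcases le_or_gt i 0 with h0 | h1
  · nlinarith [mul_self_nonneg i]
  · nlinarith

-- the 'while i*i <= n' trial-division loop of B, with the two accumulators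
def divLoop (n : Int) (i : Int) (small : List Int) (large : List Int) :
    List Int × List Int :=
  if h : i * i ≤ n then
    if PySem.Int.mod n i = 0 then
      divLoop n (i + 1) (small ++ [i])
        (if i * i ≠ n then large ++ [PySem.Int.floordiv n i] else large)
    else divLoop n (i + 1) small large
  else (small, large)
termination_by (n + 1 - i).toNat
decreasing_by
  · have := pvLeOfSqLe i n h; omega
  · have := pvLeOfSqLe i n h; omega

-- the 'for r in small + large' loop (large already reversed) of B
def searchB (a : Int) (b : Int) (c : Int) (d : Int) : List Int → Option Int
  | [] => none
  | r :: rs =>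
    if a * r ^ 3 + b * r ^ 2 + c * r = -d then some r
    else if -a * r ^ 3 + b * r ^ 2 - c * r = -d then some (-r)
    else searchB a b c d rs

def int_root_alt (a : Int) (b : Int) (c : Int) (d : Int) : Option Int :=
  if d = 0 then some 0 else
    let p := divLoop |d| 1 [] []
    searchB a b c d (p.1 ++ p.2.reverse)

-- ===== PRECONDITION & SPEC =====
def Spec_int_root (a : Int) (b : Int) (c : Int) (d : Int) (out : Option Int) : Prop := out = int_root_alt a b c d
instance (a : Int) (b : Int) (c : Int) (d : Int) (out : Option Int) : Decidable (Spec_int_root a b c d out) := by unfold Spec_int_root; infer_instance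

-- ===== CLAIM (what is proved, stated in full; the proofs are below) =====
def Claim_equal_int_root : Prop := ∀ (a : Int) (b : Int) (c : Int) (d : Int), Dom_int_root a b c d → Spec_int_root a b c d (int_root a b c d)

-- ===== LEMMAS AND PROOFS =====

-- the two search loops are the same function
theorem searchA_eq_searchB (a b c d : Int) (l : List Int) :
    searchA a b c d l = searchB a b c d l := by
  induction l with
  | nil => rfl
  | cons r rs ih => simp only [searchA, searchB, ih]

-- non-accumulator form of divLoop's result, for reasoning
def divsFrom (n : Int) (i : Int) : List Int × List Int :=
  if h : i * i ≤ n then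
    if PySem.Int.mod n i = 0 then
      (i :: (divsFrom n (i + 1)).1,
       (if i * i ≠ n then [PySem.Int.floordiv n i] else []) ++ (divsFrom n (i + 1)).2)
    else divsFrom n (i + 1)
  else ([], [])
termination_by (n + 1 - i).toNat
decreasing_by
  · have := pvLeOfSqLe i n h; omega
  · have := pvLeOfSqLe i n h; omega

theorem divsFrom_step (n i : Int) (h : i * i ≤ n) (hm : PySem.Int.mod n i = 0) :
    divsFrom n i = (i :: (divsFrom n (i + 1)).1,
      (if i * i ≠ n then [PySem.Int.floordiv n i] else []) ++ (divsFrom n (i + 1)).2) := by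
  conv_lhs => rw [divsFrom]
  simp only [dif_pos h, if_pos hm]

theorem divsFrom_skip (n i : Int) (h : i * i ≤ n) (hm : ¬ PySem.Int.mod n i = 0) :
    divsFrom n i = divsFrom n (i + 1) := by
  conv_lhs => rw [divsFrom]
  simp only [dif_pos h, if_neg hm]

theorem divsFrom_stop (n i : Int) (h : ¬ i * i ≤ n) : divsFrom n i = ([], []) := by
  conv_lhs => rw [divsFrom]
  simp only [dif_neg h]

theorem divLoop_eq (n i : Int) (s l : List Int) :
    divLoop n i s l = (s ++ (divsFrom n i).1, l ++ (divsFrom n i).2) := by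
  fun_induction divLoop n i s l with
  | case1 i s l h hm ih =>
    rw [divsFrom_step n i h hm]
    simp only [dite_eq_ite] at ih
    rw [ih]
    by_cases hne : i * i ≠ n <;> simp [hne]
  | case2 i s l h hm ih =>
    rw [divsFrom_skip n i h hm, ih]
  | case3 i s l h =>
    rw [divsFrom_stop n i h]
    simp

theorem mem_divsFrom_fst (n i x : Int) :
    1 ≤ i → (x ∈ (divsFrom n i).1 ↔ i ≤ x ∧ x * x ≤ n ∧ PySem.Int.mod n x = 0) := by
  fun_induction divsFrom n i with
  | case1 i h hm ih =>
    intro hi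
    simp only [List.mem_cons, ih (by omega)]
    constructor
    · rintro (rfl | ⟨h1, h2, h3⟩)
      · exact ⟨le_refl _, h, hm⟩
      · exact ⟨by omega, h2, h3⟩
    · rintro ⟨h1, h2, h3⟩
      rcases eq_or_lt_of_le h1 with rfl | hlt
      · exact Or.inl rfl
      · exact Or.inr ⟨by omega, h2, h3⟩
  | case2 i h hm ih =>
    intro hi
    rw [ih (by omega)]
    constructor
    · rintro ⟨h1, h2, h3⟩; exact ⟨by omega, h2, h3⟩
    · rintro ⟨h1, h2, h3⟩
      rcases eq_or_lt_of_le h1 with rfl | hlt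
      · exact absurd h3 hm
      · exact ⟨by omega, h2, h3⟩
  | case3 i h =>
    intro hi
    simp only [List.not_mem_nil, false_iff]
    rintro ⟨h1, h2, h3⟩
    have : i * i ≤ x * x := mul_le_mul h1 h1 (by omega) (by omega)
    omega

theorem mem_divsFrom_snd (n i y : Int) :
    1 ≤ i → (y ∈ (divsFrom n i).2 ↔
      ∃ x, i ≤ x ∧ x * x ≤ n ∧ x * x ≠ n ∧ PySem.Int.mod n x = 0 ∧
        y = PySem.Int.floordiv n x) := by
  fun_induction divsFrom n i with
  | case1 i h hm ih =>
    intro hi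
    by_cases hne : i * i ≠ n
    · simp only [if_pos hne, List.cons_append, List.nil_append, List.mem_cons, ih (by omega)]
      constructor
      · rintro (rfl | ⟨x, h1, h2, h3, h4, h5⟩)
        · exact ⟨i, le_refl _, h, hne, hm, rfl⟩
        · exact ⟨x, by omega, h2, h3, h4, h5⟩
      · rintro ⟨x, h1, h2, h3, h4, h5⟩
        rcases eq_or_lt_of_le h1 with rfl | hlt
        · exact Or.inl h5
        · exact Or.inr ⟨x, by omega, h2, h3, h4, h5⟩
    · simp only [if_neg hne, List.nil_append, ih (by omega)]
      constructor
      · rintro ⟨x, h1, h2, h3, h4, h5⟩; exact ⟨x, by omega, h2, h3, h4, h5⟩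
      · rintro ⟨x, h1, h2, h3, h4, h5⟩
        rcases eq_or_lt_of_le h1 with rfl | hlt
        · exact absurd h3 hne
        · exact ⟨x, by omega, h2, h3, h4, h5⟩
  | case2 i h hm ih =>
    intro hi
    rw [ih (by omega)]
    constructor
    · rintro ⟨x, h1, h2, h3, h4, h5⟩; exact ⟨x, by omega, h2, h3, h4, h5⟩
    · rintro ⟨x, h1, h2, h3, h4, h5⟩
      rcases eq_or_lt_of_le h1 with rfl | hlt
      · exact absurd h4 hm
      · exact ⟨x, by omega, h2, h3, h4, h5⟩
  | case3 i h =>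
    intro hi
    simp only [List.not_mem_nil, false_iff]
    rintro ⟨x, h1, h2, h3, h4, h5⟩
    have : i * i ≤ x * x := mul_le_mul h1 h1 (by omega) (by omega)
    omega

-- codivisor arithmetic: x ∣ n, 1 ≤ x, x² < n  ⇒  n < (n/x)²
theorem pvCodivSqGt (n x : Int) (hx : 1 ≤ x) (hd : x ∣ n) (hlt : x * x < n) :
    n < (n / x) * (n / x) := by
  obtain ⟨k, rfl⟩ := hd
  rw [Int.mul_ediv_cancel_left _ (by omega)]
  nlinarith

-- divisors' codivisors are strictly decreasing
theorem pvCodivLt (n i x : Int) (h1 : 1 ≤ i) (hix : i < x)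
    (hi : i ∣ n) (hx : x ∣ n) (hn : 1 ≤ n) : n / x < n / i := by
  obtain ⟨ki, hki⟩ := hi
  obtain ⟨kx, hkx⟩ := hx
  have e1 : n / i = ki := by rw [hki, Int.mul_ediv_cancel_left _ (by omega)]
  have e2 : n / x = kx := by rw [hkx, Int.mul_ediv_cancel_left _ (by omega)]
  rw [e1, e2]
  have hkx1 : 1 ≤ kx := by nlinarith
  nlinarith

theorem pvModDvd (n x : Int) (h : PySem.Int.mod n x = 0) : x ∣ n :=
  (PySem.Int.mod_eq_zero_iff_dvd n x).1 h

theorem pairwise_divsFrom_fst (n i : Int) :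
    1 ≤ i → ((divsFrom n i).1).Pairwise (· < ·) := by
  fun_induction divsFrom n i with
  | case1 i h hm ih =>
    intro hi
    refine List.Pairwise.cons ?_ (ih (by omega))
    intro x hx
    have := (mem_divsFrom_fst n (i + 1) x (by omega)).1 hx
    omega
  | case2 i h hm ih => intro hi; exact ih (by omega)
  | case3 i h => intro _; exact List.Pairwise.nil

theorem pairwise_divsFrom_snd (n i : Int) :
    1 ≤ i → ((divsFrom n i).2).Pairwise (· > ·) := by
  fun_induction divsFrom n i with
  | case1 i h hm ih =>
    intro hi
    by_cases hne : i * i ≠ n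
    · simp only [if_pos hne, List.cons_append, List.nil_append]
      refine List.Pairwise.cons ?_ (ih (by omega))
      intro y hy
      obtain ⟨x, hx1, hx2, hx3, hx4, rfl⟩ :=
        (mem_divsFrom_snd n (i + 1) y (by omega)).1 hy
      have hn1 : 1 ≤ n := by nlinarith
      have hdi : i ∣ n := pvModDvd n i hm
      have hdx : x ∣ n := pvModDvd n x hx4
      have hlt := pvCodivLt n i x hi (by omega) hdi hdx hn1
      rw [PySem.Int.floordiv_eq_ediv_of_pos (by omega),
          PySem.Int.floordiv_eq_ediv_of_pos (by omega)]
      exact hlt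
    · simp only [if_neg hne, List.nil_append]; exact ih (by omega)
  | case2 i h hm ih => intro hi; exact ih (by omega)
  | case3 i h => intro _; exact List.Pairwise.nil

-- the combined list of B is exactly A's factor list (n ≥ 1)
theorem combined_eq_pyFactors (n : Int) (hn : 1 ≤ n) :
    (divsFrom n 1).1 ++ ((divsFrom n 1).2).reverse = pyFactors n := by
  have hfac : pyFactors n =
      (PySem.List.pyRange 1 (n + 1) 1).filter (fun i => decide (PySem.Int.mod n i = 0)) := by
    unfold pyFactors
    rw [PySem.List.foldl_append_ite_eq_filter]
    simp
  -- membership of the combined list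
  have hmemL : ∀ x : Int, x ∈ (divsFrom n 1).1 ++ ((divsFrom n 1).2).reverse ↔
      (1 ≤ x ∧ x ≤ n ∧ PySem.Int.mod n x = 0) := by
    intro x
    simp only [List.mem_append, List.mem_reverse,
      mem_divsFrom_fst n 1 x (le_refl 1), mem_divsFrom_snd n 1 x (le_refl 1)]
    constructor
    · rintro (⟨h1, h2, h3⟩ | ⟨j, h1, h2, h3, h4, rfl⟩)
      · exact ⟨h1, by nlinarith, h3⟩
      · have hdj : j ∣ n := pvModDvd n j h4
        obtain ⟨k, hk⟩ := hdj
        have hk1 : 1 ≤ k := by nlinarith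
        have hjk : n / j = k := by rw [hk, Int.mul_ediv_cancel_left _ (by omega)]
        rw [PySem.Int.floordiv_eq_ediv_of_pos (by omega), hjk]
        refine ⟨hk1, by nlinarith, ?_⟩
        rw [PySem.Int.mod_eq_zero_iff_dvd]
        exact ⟨j, by rw [hk]; ring⟩
    · rintro ⟨h1, h2, h3⟩
      have hdx : x ∣ n := pvModDvd n x h3
      by_cases hsq : x * x ≤ n
      · exact Or.inl ⟨h1, hsq, h3⟩
      · refine Or.inr ?_
        obtain ⟨k, hk⟩ := hdx
        have hk1 : 1 ≤ k := by nlinarith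
        have hkklt : k * k < n := by nlinarith
        have hkd : PySem.Int.mod n k = 0 := by
          rw [PySem.Int.mod_eq_zero_iff_dvd]; exact ⟨x, by rw [hk]; ring⟩
        refine ⟨k, hk1, by omega, by omega, hkd, ?_⟩
        rw [PySem.Int.floordiv_eq_ediv_of_pos (by omega), hk, mul_comm,
            Int.mul_ediv_cancel_left _ (by omega)]
  -- membership of A's list
  have hmemR : ∀ x : Int, x ∈ pyFactors n ↔ (1 ≤ x ∧ x ≤ n ∧ PySem.Int.mod n x = 0) := by
    intro x
    rw [hfac]
    simp only [List.mem_filter, PySem.List.mem_pyRange_one, decide_eq_true_eq]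
    constructor
    · rintro ⟨⟨u1, u2⟩, u3⟩; exact ⟨u1, by omega, u3⟩
    · rintro ⟨u1, u2, u3⟩; exact ⟨⟨u1, by omega⟩, u3⟩
  -- both strictly sorted
  have hsortL : ((divsFrom n 1).1 ++ ((divsFrom n 1).2).reverse).Pairwise (· < ·) := by
    rw [List.pairwise_append]
    refine ⟨pairwise_divsFrom_fst n 1 (le_refl 1), ?_, ?_⟩
    · rw [List.pairwise_reverse]
      exact pairwise_divsFrom_snd n 1 (le_refl 1)
    · intro x hx y hy
      rw [List.mem_reverse] at hy
      obtain ⟨h1, h2, h3⟩ := (mem_divsFrom_fst n 1 x (le_refl 1)).1 hx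
      obtain ⟨j, g1, g2, g3, g4, rfl⟩ := (mem_divsFrom_snd n 1 y (le_refl 1)).1 hy
      have hdj : j ∣ n := pvModDvd n j g4
      have hgt : n < (n / j) * (n / j) := pvCodivSqGt n j g1 hdj (by omega)
      have hy0 : 0 ≤ n / j := Int.ediv_nonneg (by omega) (by omega)
      rw [PySem.Int.floordiv_eq_ediv_of_pos (by omega)]
      by_contra hcon
      rw [not_lt] at hcon
      have := mul_le_mul hcon hcon hy0 (by omega)
      omega
  have hsortR : (pyFactors n).Pairwise (· < ·) := by
    rw [hfac]
    exact (PySem.List.pairwise_lt_pyRange_one 1 (n + 1)).sublist List.filter_sublist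
  -- equal: strictly sorted, same members
  have hperm : ((divsFrom n 1).1 ++ ((divsFrom n 1).2).reverse).Perm (pyFactors n) := by
    rw [List.perm_ext_iff_of_nodup
      (hsortL.imp fun h => ne_of_lt h) (hsortR.imp fun h => ne_of_lt h)]
    intro x
    rw [hmemL x, hmemR x]
  exact hperm.eq_of_pairwise (fun a b _ _ h1 h2 => absurd h2 (asymm h1)) hsortL hsortR

-- ===== VERDICT (by name: the statement is the Claim_ definition above) =====
theorem int_root_spec : Claim_equal_int_root := by
  intro a b c d _
  unfold Spec_int_root int_root int_root_alt
  by_cases hd : d = 0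
  · simp [hd]
  · have hn : 1 ≤ |d| := Int.one_le_abs (by omega)
    simp only [if_neg hd, divLoop_eq, List.nil_append]
    rw [combined_eq_pyFactors |d| hn, searchA_eq_searchB]
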